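-- pv_equiv track=rewrite | github.com/cornell-zhang/heurigym | scripts/collect_results.py | calculate_solve_at_i
-- ===== SOURCE A (Python) =====
-- from collections import defaultdict
--
-- def get_stage_number(error_type):
--     """Get the stage number from error type."""
--     # order is important
--     if "Stage IV" in error_type:
--         return 4
--     if "Stage III" in error_type:
--         return 3
--     if "Stage II" in error_type:
--         return 2
--     if "Stage I" in error_type:
--         return 1
--     return 0
--
-- def calculate_solve_at_i(all_errors, i):
--     """Calculate solve@i metrics for the first i iterations."""
--     # Get the first i iterations (grouped by iteration number, ignoring samples)
--     iteration_groups = defaultdict(list)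
--     for key in sorted(all_errors.keys()):
--         # Extract iteration number from key (e.g., "iteration0/sample0" -> "iteration0")
--         iteration_num = key.split('/')[0]
--         iteration_groups[iteration_num].append(key)
--
--     # Get the first i iteration groups
--     first_i_iterations = sorted(iteration_groups.keys())[:i]
--
--     # Track the best stage each test case passes in the first i iterations
--     test_case_best_stages = defaultdict(int)
--
--     # For each iteration group, look at all its samples
--     for iteration in first_i_iterations:
--         # Get all samples for this iteration
--         samples = iteration_groups[iteration]
--
--         # For each test case, check if any sample passes each stage
--         test_case_stages = defaultdict(int)
--
--         # First, find the best stage achieved by any sample for each test case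
--         for sample in samples:
--             iteration_errors = all_errors[sample]
--             for test_case, error_info in iteration_errors.items():
--                 error_type = error_info.get("error_type", "Unknown Error")
--                 stage_num = get_stage_number(error_type)
--                 if stage_num > 0:  # If it's a valid stage
--                     test_case_stages[test_case] = max(test_case_stages[test_case], stage_num - 1)
--
--         # Update the overall best stages with this iteration's results
--         for test_case, stage in test_case_stages.items():
--             test_case_best_stages[test_case] = max(test_case_best_stages[test_case], stage)
--
--     # Calculate stage pass statistics
--     stage_pass_stats = defaultdict(int)
--     for stage in test_case_best_stages.values():
--         # If a test case passes stage N, it also passes all stages 0 to N-1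
--         for s in range(stage + 1):
--             stage_pass_stats[s] += 1
--
--     return stage_pass_stats
-- ===== SOURCE B (Python) =====
-- def get_stage_number(error_type):
--     """Get the stage number from error type."""
--     # order is important
--     if "Stage IV" in error_type:
--         return 4
--     if "Stage III" in error_type:
--         return 3
--     if "Stage II" in error_type:
--         return 2
--     if "Stage I" in error_type:
--         return 1
--     return 0
--
-- def calculate_solve_at_i(all_errors, i):
--     """Calculate solve@i metrics for the first i iterations.
--
--     Stage-major aggregation: one reachability set per stage index (the test
--     cases for which some allowed sample reaches at least that stage); the
--     answer is the set sizes up to the first empty stage.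
--     """
--     allowed = set(sorted({key.split('/')[0] for key in all_errors})[:i])
--     reached = [set(), set(), set(), set()]
--     for key, errors in all_errors.items():
--         if key.split('/')[0] in allowed:
--             for test_case, error_info in errors.items():
--                 n = get_stage_number(error_info.get("error_type", "Unknown Error"))
--                 for s in range(n):
--                     reached[s].add(test_case)
--     result = {}
--     for s, r in enumerate(reached):
--         if not r:
--             break
--         result[s] = len(r)
--     return result
-- ===== Notes on version B (the rewrite author's own statement) =====
-- stated objective: alternative
-- what changed: Inverts the aggregation from test-case-major to stage-major: instead of per-iteration dicts tracking each test case's best stage, then merging maxima and tallying ranges, B keeps one reachability set per stage index (test cases some allowed sample takes to at least that stage, a fixed array of 4 sets since stages are 1..4) filled in a single filtered pass, and returns the set sizes up to the first empty stage; no best-stage dict, no max, no range tally.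
import Mathlib
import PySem

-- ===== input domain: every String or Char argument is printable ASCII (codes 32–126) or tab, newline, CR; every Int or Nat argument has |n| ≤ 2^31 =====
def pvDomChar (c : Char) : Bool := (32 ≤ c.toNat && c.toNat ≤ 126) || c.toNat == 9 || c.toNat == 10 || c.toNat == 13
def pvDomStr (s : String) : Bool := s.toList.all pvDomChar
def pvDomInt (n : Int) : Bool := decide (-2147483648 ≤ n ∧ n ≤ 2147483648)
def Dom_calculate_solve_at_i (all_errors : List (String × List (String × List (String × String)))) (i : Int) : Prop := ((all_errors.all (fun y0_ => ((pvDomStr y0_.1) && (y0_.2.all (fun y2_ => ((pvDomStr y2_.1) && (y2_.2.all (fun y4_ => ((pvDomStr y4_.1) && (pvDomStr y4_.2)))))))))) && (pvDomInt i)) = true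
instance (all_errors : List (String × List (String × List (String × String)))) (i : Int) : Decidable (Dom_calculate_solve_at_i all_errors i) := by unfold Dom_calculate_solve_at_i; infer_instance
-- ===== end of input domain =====

-- B inverts the aggregation from test-case-major to stage-major: one reachability set per
-- stage index, filled in a single filtered pass, returning set sizes up to the first empty
-- stage (objective: alternative; same return value on all inputs with distinct outer keys).

-- key.split('/')[0]  (split by a nonempty separator always yields at least one piece)
def pvIterPrefix (key : String) : String :=
  ((PySem.Str.split? key "/").getD []).headD ""

-- shared module-level helper get_stage_number, transliterated branch for branch
def getStageNumber (error_type : String) : Int :=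
  if PySem.Str.isIn "Stage IV" error_type then 4
  else if PySem.Str.isIn "Stage III" error_type then 3
  else if PySem.Str.isIn "Stage II" error_type then 2
  else if PySem.Str.isIn "Stage I" error_type then 1
  else 0

-- ===== PORT A =====
def calculate_solve_at_i (all_errors : List (String × List (String × List (String × String)))) (i : Int) : List (Int × Int) :=
  let d : PySem.Dict String (List (String × List (String × String))) := PySem.Dict.mk all_errors
  -- iteration_groups: defaultdict(list) filled over sorted(all_errors.keys())
  let iteration_groups : PySem.Dict String (List String) :=
    (PySem.List.sorted d.keys (fun k => k) false).foldl
      (fun g key => g.modify (pvIterPrefix key) [] (fun v => v ++ [key]))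
      PySem.Dict.empty
  -- first_i_iterations = sorted(iteration_groups.keys())[:i]
  let first_i_iterations : List String :=
    PySem.List.slice (PySem.List.sorted iteration_groups.keys (fun k => k) false) none (some i)
  -- test_case_best_stages, built iteration by iteration through test_case_stages
  let test_case_best_stages : PySem.Dict String Int :=
    first_i_iterations.foldl (fun best iteration =>
      let samples := iteration_groups.getD iteration []
      let test_case_stages : PySem.Dict String Int :=
        samples.foldl (fun tcs sample =>
          -- all_errors[sample]: sample is always a key of d, so the default is never taken
          let iteration_errors := d.getD sample []
          iteration_errors.foldl (fun tcs q =>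
            let error_type := (PySem.Dict.mk q.2).getD "error_type" "Unknown Error"
            let stage_num := getStageNumber error_type
            if stage_num > 0 then tcs.insert q.1 (max (tcs.getD q.1 0) (stage_num - 1)) else tcs)
            tcs)
          PySem.Dict.empty
      test_case_stages.items.foldl (fun best p =>
        best.insert p.1 (max (best.getD p.1 0) p.2)) best)
      PySem.Dict.empty
  -- stage_pass_stats: for each best stage, bump counts for 0..stage
  let stage_pass_stats : PySem.Dict Int Int :=
    test_case_best_stages.values.foldl (fun stats stage =>
      (PySem.List.pyRange 0 (stage + 1) 1).foldl (fun stats s => stats.modify s 0 (fun c => c + 1)) stats)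
      PySem.Dict.empty
  stage_pass_stats.items

-- ===== PORT B =====
-- reached[s].add(tc) — s is an in-range index, so the list update is exact
def pvSetAt (rs : List (PySem.Set String)) (s : Int) (tc : String) : List (PySem.Set String) :=
  rs.mapIdx (fun j x => if (j : Int) = s then PySem.Set.add x tc else x)

-- the result loop 'for s, r in enumerate(reached): if not r: break; result[s] = len(r)'
def pvTally : List (PySem.Set String) → Int → List (Int × Int)
  | [], _ => []
  | r :: rest, s => if r.isEmpty then [] else (s, PySem.Set.len r) :: pvTally rest (s + 1)

def calculate_solve_at_i_alt (all_errors : List (String × List (String × List (String × String)))) (i : Int) : List (Int × Int) :=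
  -- allowed = set(sorted({prefix of each key})[:i])
  let allowed : PySem.Set String :=
    PySem.Set.ofList (PySem.List.slice
      (PySem.List.sorted (PySem.Set.ofList (all_errors.map (fun p => pvIterPrefix p.1))) (fun k => k) false)
      none (some i))
  -- reached[s] = test cases some allowed sample takes to at least stage index s
  let reached : List (PySem.Set String) :=
    all_errors.foldl (fun rs p =>
      if PySem.Set.contains allowed (pvIterPrefix p.1) then
        p.2.foldl (fun rs q =>
          let n := getStageNumber ((PySem.Dict.mk q.2).getD "error_type" "Unknown Error")
          (PySem.List.pyRange 0 n 1).foldl (fun rs s => pvSetAt rs s q.1) rs) rs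
      else rs)
      [PySem.Set.empty, PySem.Set.empty, PySem.Set.empty, PySem.Set.empty]
  pvTally reached 0

-- ===== PRECONDITION & SPEC =====
-- Pre_ excludes association lists whose outer keys repeat: the Python A takes a dict, whose
-- items list can never carry a duplicate key, so this excludes nothing A is ever run on.
def Pre_calculate_solve_at_i (all_errors : List (String × List (String × List (String × String)))) (i : Int) : Prop :=
  (all_errors.map (fun p => p.1)).Nodup
instance (all_errors : List (String × List (String × List (String × String)))) (i : Int) : Decidable (Pre_calculate_solve_at_i all_errors i) := by unfold Pre_calculate_solve_at_i; infer_instance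

def pvWitness_calculate_solve_at_i : (List (String × List (String × List (String × String)))) × Int :=
  ([("iteration0/sample0", [("tc0", [("error_type", "Stage II Error")])]),
    ("iteration1/sample0", [("tc0", [("error_type", "Stage I Error")])])], 1)

def Spec_calculate_solve_at_i (all_errors : List (String × List (String × List (String × String)))) (i : Int) (out : List (Int × Int)) : Prop := out = calculate_solve_at_i_alt all_errors i
instance (all_errors : List (String × List (String × List (String × String)))) (i : Int) (out : List (Int × Int)) : Decidable (Spec_calculate_solve_at_i all_errors i out) := by unfold Spec_calculate_solve_at_i; infer_instance

-- ===== CLAIM (what is proved, stated in full; the proofs are below) =====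
def Claim_equal_calculate_solve_at_i : Prop := ∀ (all_errors : List (String × List (String × List (String × String)))) (i : Int), Dom_calculate_solve_at_i all_errors i → Pre_calculate_solve_at_i all_errors i → Spec_calculate_solve_at_i all_errors i (calculate_solve_at_i all_errors i)

-- ===== LEMMAS AND PROOFS =====

-- ---- proof-side abbreviations for the shared pieces of the two ports ----

def stageOf (q : String × List (String × String)) : Int :=
  getStageNumber ((PySem.Dict.mk q.2).getD "error_type" "Unknown Error")

def gpair (q : String × List (String × String)) : String × Int := (q.1, stageOf q - 1)

def cpos (q : String × List (String × String)) : Bool := decide (0 < stageOf q)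

def posPairs (errs : List (String × List (String × String))) : List (String × Int) :=
  (errs.filter cpos).map gpair

def stepA (d : PySem.Dict String Int) (p : String × Int) : PySem.Dict String Int :=
  d.insert p.1 (max (d.getD p.1 0) p.2)

def mval (L : List (String × Int)) (tc : String) : Int :=
  ((L.filter (fun p => p.1 == tc)).map (fun p => p.2)).foldl max 0

-- ---- small arithmetic / fold facts ----

theorem stageOf_le_four (q : String × List (String × String)) : stageOf q ≤ 4 := by
  unfold stageOf getStageNumber; split_ifs <;> norm_num

theorem foldl_max_max (vs : List Int) (a : Int) : ∀ b, vs.foldl max (max a b) = max a (vs.foldl max b) := by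
  induction vs with
  | nil => intro b; rfl
  | cons v t ih =>
    intro b
    have : max (max a b) v = max a (max b v) := by omega
    simp only [List.foldl_cons, this, ih]

theorem foldl_max_split (vs : List Int) (b : Int) (hb : 0 ≤ b) :
    vs.foldl max b = max b (vs.foldl max 0) := by
  have h := foldl_max_max vs b 0
  rwa [max_eq_left hb] at h

theorem mval_nonneg (L : List (String × Int)) (tc : String) : 0 ≤ mval L tc := by
  exact (PySem.List.le_foldl_max _ 0).1

theorem foldl_max_le (vs : List Int) : ∀ (a b : Int), a ≤ b → (∀ v ∈ vs, v ≤ b) →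
    vs.foldl max a ≤ b := by
  induction vs with
  | nil => intro a b ha _; exact ha
  | cons v t ih =>
    intro a b ha hv
    simp only [List.foldl_cons]
    refine ih _ _ ?_ (fun x hx => hv x (List.mem_cons_of_mem _ hx))
    have := hv v List.mem_cons_self
    omega

theorem exists_ge_of_foldl_max (vs : List Int) : ∀ (a s : Int), a < s → s ≤ vs.foldl max a →
    ∃ v ∈ vs, s ≤ v := by
  induction vs with
  | nil =>
    intro a s ha h
    simp only [List.foldl_nil] at h
    exact absurd h (by omega)
  | cons v t ih =>
    intro a s ha h
    simp only [List.foldl_cons] at h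
    by_cases hv : s ≤ v
    · exact ⟨v, List.mem_cons_self, hv⟩
    · rcases ih (max a v) s (by omega) h with ⟨w, hw, hws⟩
      exact ⟨w, List.mem_cons_of_mem _ hw, hws⟩

theorem foldl_max_ge_iff (vs : List Int) (a s : Int) (ha : a < s) :
    s ≤ vs.foldl max a ↔ ∃ v ∈ vs, s ≤ v := by
  constructor
  · exact exists_ge_of_foldl_max vs a s ha
  · rintro ⟨v, hv, hvs⟩
    exact le_trans hvs ((PySem.List.le_foldl_max vs a).2 v hv)

theorem mval_append (L0 L1 : List (String × Int)) (tc : String) :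
    mval (L0 ++ L1) tc = ((L1.filter (fun p => p.1 == tc)).map (fun p => p.2)).foldl max (mval L0 tc) := by
  unfold mval
  rw [List.filter_append, List.map_append, List.foldl_append]

theorem mval_ge_of_mem (L : List (String × Int)) (p : String × Int) (hp : p ∈ L) (tc : String)
    (h1 : p.1 = tc) : p.2 ≤ mval L tc := by
  unfold mval
  refine (PySem.List.le_foldl_max _ 0).2 p.2 ?_
  exact List.mem_map.mpr ⟨p, List.mem_filter.mpr ⟨hp, by simp [h1]⟩, rfl⟩

theorem exists_of_mval_ge (L : List (String × Int)) (tc : String) (s : Int) (hs : 0 < s)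
    (h : s ≤ mval L tc) : ∃ p ∈ L, p.1 = tc ∧ s ≤ p.2 := by
  unfold mval at h
  rcases exists_ge_of_foldl_max _ 0 s hs h with ⟨v, hv, hvs⟩
  rcases List.mem_map.mp hv with ⟨p, hp, rfl⟩
  exact ⟨p, (List.mem_filter.mp hp).1, beq_iff_eq.mp (List.mem_filter.mp hp).2, hvs⟩

-- ---- the insert-max fold (A's accumulation step) ----

theorem foldA_getD (l : List (String × Int)) : ∀ (d : PySem.Dict String Int) (tc : String),
    (l.foldl stepA d).getD tc 0
      = ((l.filter (fun p => p.1 == tc)).map (fun p => p.2)).foldl max (d.getD tc 0) := by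
  induction l with
  | nil => intro d tc; rfl
  | cons p t ih =>
    intro d tc
    simp only [List.foldl_cons, List.filter_cons]
    by_cases h : p.1 = tc
    · have hb : (p.1 == tc) = true := beq_iff_eq.mpr h
      rw [hb, if_pos rfl]
      simp only [List.map_cons, List.foldl_cons, ih]
      have : (stepA d p).getD tc 0 = max (d.getD tc 0) p.2 := by
        unfold stepA; rw [PySem.Dict.getD_insert, if_pos h.symm, h]
      rw [this]
    · have hb : (p.1 == tc) = false := beq_eq_false_iff_ne.mpr h
      rw [hb]
      simp only [Bool.false_eq_true, if_false, ih]
      have : (stepA d p).getD tc 0 = d.getD tc 0 := by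
        unfold stepA; rw [PySem.Dict.getD_insert, if_neg (fun hh => h hh.symm)]
      rw [this]

theorem foldA_mem (l : List (String × Int)) (d : PySem.Dict String Int) (tc : String) :
    tc ∈ (l.foldl stepA d).keys ↔ tc ∈ d.keys ∨ ∃ p ∈ l, p.1 = tc := by
  have hk : (l.foldl stepA d).keys = PySem.Set.update d.keys (l.map (fun p => p.1)) := by
    simpa [stepA] using
      PySem.Dict.keys_foldl_insert_key l (fun p => p.1) (fun d p => max (d.getD p.1 0) p.2) d
  rw [hk, PySem.Set.mem_update]
  simp [List.mem_map, eq_comm]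

theorem foldA_nodup (l : List (String × Int)) (d : PySem.Dict String Int) (h : d.keys.Nodup) :
    (l.foldl stepA d).keys.Nodup := by
  simpa [stepA] using
    PySem.Dict.nodup_keys_foldl_insert_key l (fun p => p.1) (fun d p => max (d.getD p.1 0) p.2) d h

-- ---- items of a nodup dict filtered by one key ----

theorem items_filter_snd (d : PySem.Dict String Int) (hnd : d.keys.Nodup) (tc : String) :
    (d.items.filter (fun p => p.1 == tc)).map (fun p => p.2)
      = if tc ∈ d.keys then [d.getD tc 0] else [] := by
  rw [PySem.Dict.items_eq_map_keys d hnd 0]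
  rw [List.filter_map]
  have : ((fun p : String × Int => p.1 == tc) ∘ fun k => (k, d.getD k 0)) = fun k => k == tc := rfl
  rw [this]
  rw [List.filter_beq, hnd.count]
  by_cases h : tc ∈ d.keys
  · simp [h]
  · simp [h]

-- ---- disjoint filters / grouping permutation ----

theorem filter_or_perm {α : Type} (p q : α → Bool) (l : List α)
    (hdisj : ∀ x ∈ l, p x = true → q x = false) :
    (l.filter p ++ l.filter q).Perm (l.filter (fun x => p x || q x)) := by
  induction l with
  | nil => simp
  | cons x t ih =>
    have iht := ih (fun y hy => hdisj y (List.mem_cons_of_mem _ hy))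
    by_cases hp : p x = true
    · have hq : q x = false := hdisj x List.mem_cons_self hp
      simp only [List.filter_cons, hp, hq, if_true, Bool.false_eq_true, if_false,
        Bool.true_or, List.cons_append]
      exact iht.cons x
    · by_cases hq : q x = true
      · simp only [List.filter_cons, hp, hq, Bool.false_eq_true, if_false, if_true,
          Bool.false_or]
        exact (List.perm_middle).trans (iht.cons x)
      · simp only [List.filter_cons, hp, hq, Bool.false_eq_true, if_false, Bool.false_or]
        exact iht

theorem partition_flatMap_perm {α : Type} (key : α → String) (vs : List String) (hvs : vs.Nodup)
    (l : List α) :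
    (vs.flatMap (fun v => l.filter (fun x => key x == v))).Perm
      (l.filter (fun x => decide (key x ∈ vs))) := by
  induction vs with
  | nil =>
    simp
  | cons v t ih =>
    have hvt : v ∉ t := (List.nodup_cons.mp hvs).1
    have iht := ih (List.nodup_cons.mp hvs).2
    simp only [List.flatMap_cons]
    have h1 : (l.filter (fun x => key x == v) ++ t.flatMap (fun v => l.filter (fun x => key x == v))).Perm
        (l.filter (fun x => key x == v) ++ l.filter (fun x => decide (key x ∈ t))) :=
      List.Perm.append_left _ iht
    refine h1.trans ?_
    have h2 := filter_or_perm (fun x => key x == v) (fun x => decide (key x ∈ t)) l ?_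
    · refine h2.trans ?_
      apply List.Perm.of_eq
      apply List.filter_congr
      intro x _
      by_cases hkv : key x = v <;> by_cases hkt : key x ∈ t <;>
        simp [hkv, hkt, List.mem_cons]
    · intro x _ hx
      have : key x = v := beq_iff_eq.mp hx
      simp [this, hvt]

-- ---- the range tally: ofList of the flattened ranges, and its counts ----

theorem addRange (n : Nat) : ∀ (c v K : Int), 0 ≤ c → c ≤ K → n = (v + 1 - c).toNat →
    (PySem.List.pyRange c (v+1) 1).foldl PySem.Set.add (PySem.List.pyRange 0 K 1)
      = PySem.List.pyRange 0 (max K (v+1)) 1 := by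
  induction n with
  | zero =>
    intro c v K hc hK hn
    have : v + 1 ≤ c := by omega
    rw [PySem.List.pyRange_one_eq_nil this]
    simp only [List.foldl_nil]
    congr 1
    omega
  | succ m ih =>
    intro c v K hc hK hn
    by_cases hlt : c < v + 1
    · rw [PySem.List.pyRange_one_cons hlt]
      simp only [List.foldl_cons]
      by_cases hcK : c < K
      · have hadd : PySem.Set.add (PySem.List.pyRange 0 K 1) c = PySem.List.pyRange 0 K 1 := by
          unfold PySem.Set.add PySem.Set.contains
          have : c ∈ PySem.List.pyRange 0 K 1 := PySem.List.mem_pyRange_one.mpr ⟨hc, hcK⟩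
          simp [this]
        rw [hadd, ih (c+1) v K (by omega) (by omega) (by omega)]
      · have hcK' : c = K := by omega
        have hnm : c ∉ PySem.List.pyRange 0 K 1 := by
          intro hmem
          have := PySem.List.mem_pyRange_one.mp hmem
          omega
        have hadd : PySem.Set.add (PySem.List.pyRange 0 K 1) c
            = PySem.List.pyRange 0 (K+1) 1 := by
          unfold PySem.Set.add PySem.Set.contains
          rw [if_neg (by simp [hnm])]
          rw [hcK']
          exact (PySem.List.pyRange_one_succ_right (by omega)).symm
        rw [hadd, ih (c+1) v (K+1) (by omega) (by omega) (by omega)]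
        congr 1
        omega
    · have : v + 1 ≤ c := by omega
      rw [PySem.List.pyRange_one_eq_nil this]
      simp only [List.foldl_nil]
      congr 1
      omega

theorem range_set_aux (vals : List Int) : ∀ (M : Int), -1 ≤ M → (∀ v ∈ vals, 0 ≤ v) →
    vals.foldl (fun acc v => (PySem.List.pyRange 0 (v+1) 1).foldl PySem.Set.add acc)
      (PySem.List.pyRange 0 (M+1) 1)
      = PySem.List.pyRange 0 (vals.foldl max M + 1) 1 := by
  induction vals with
  | nil =>
    intro M _ _
    simp
  | cons v t ih =>
    intro M hM hv
    simp only [List.foldl_cons]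
    have h0 : 0 ≤ v := hv v List.mem_cons_self
    rw [addRange (v + 1 - 0).toNat 0 v (M+1) le_rfl (by omega) (by omega)]
    have : max (M+1) (v+1) = max M v + 1 := by omega
    rw [this, ih (max M v) (by omega) (fun x hx => hv x (List.mem_cons_of_mem _ hx))]

theorem range_set (vals : List Int) (h : ∀ v ∈ vals, 0 ≤ v) :
    PySem.Set.ofList (vals.flatMap (fun v => PySem.List.pyRange 0 (v+1) 1))
      = PySem.List.pyRange 0 (vals.foldl max (-1) + 1) 1 := by
  rw [PySem.Set.ofList_eq_foldl, List.foldl_flatMap]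
  have h0 : (List.nil : List Int) = PySem.List.pyRange 0 ((-1) + 1) 1 := by
    rw [PySem.List.pyRange_one_eq_nil (by omega)]
  calc vals.foldl (fun acc v => (PySem.List.pyRange 0 (v+1) 1).foldl PySem.Set.add acc) []
      = vals.foldl (fun acc v => (PySem.List.pyRange 0 (v+1) 1).foldl PySem.Set.add acc)
          (PySem.List.pyRange 0 ((-1)+1) 1) := by rw [← h0]
    _ = PySem.List.pyRange 0 (vals.foldl max (-1) + 1) 1 := range_set_aux vals (-1) le_rfl h

theorem count_flat_ranges (vals : List Int) (s : Int) (hs : 0 ≤ s) :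
    List.count s (vals.flatMap (fun v => PySem.List.pyRange 0 (v+1) 1))
      = vals.countP (fun v => decide (s ≤ v)) := by
  rw [List.count_flatMap]
  induction vals with
  | nil => simp
  | cons v t ih =>
    simp only [List.map_cons, List.sum_cons, List.countP_cons, ih, Function.comp]
    have hcnt : List.count s (PySem.List.pyRange 0 (v+1) 1)
        = if s ≤ v then 1 else 0 := by
      rw [(PySem.List.nodup_pyRange_one 0 (v+1)).count]
      by_cases hm : s ≤ v
      · rw [if_pos (PySem.List.mem_pyRange_one.mpr ⟨hs, by omega⟩), if_pos hm]
      · rw [if_neg (fun hmem => hm (by have := PySem.List.mem_pyRange_one.mp hmem; omega)), if_neg hm]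
    rw [hcnt]
    by_cases hm : s ≤ v
    · simp [hm]
      omega
    · simp [hm]

-- ---- A's outer loop invariant ----

theorem A_outer (S : String → List (String × Int)) (its : List String) :
    ∀ (best : PySem.Dict String Int) (L0 : List (String × Int)),
    (∀ tc, best.getD tc 0 = mval L0 tc) →
    (∀ tc, tc ∈ best.keys ↔ ∃ p ∈ L0, p.1 = tc) →
    best.keys.Nodup →
    (∀ tc, (its.foldl (fun b it => (((S it).foldl stepA PySem.Dict.empty).items).foldl stepA b) best).getD tc 0
        = mval (L0 ++ its.flatMap S) tc) ∧
    (∀ tc, tc ∈ (its.foldl (fun b it => (((S it).foldl stepA PySem.Dict.empty).items).foldl stepA b) best).keys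
        ↔ ∃ p ∈ L0 ++ its.flatMap S, p.1 = tc) ∧
    (its.foldl (fun b it => (((S it).foldl stepA PySem.Dict.empty).items).foldl stepA b) best).keys.Nodup := by
  induction its with
  | nil =>
    intro best L0 hg hm hnd
    refine ⟨?_, ?_, ?_⟩ <;> simp only [List.foldl_nil, List.flatMap_nil, List.append_nil]
    · exact hg
    · exact hm
    · exact hnd
  | cons it t ih =>
    intro best L0 hg hm hnd
    simp only [List.foldl_cons]
    have hndtcs : ((S it).foldl stepA PySem.Dict.empty).keys.Nodup :=
      foldA_nodup _ _ (by simp [PySem.Dict.keys_empty])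
    have htcsgetD : ∀ tc, ((S it).foldl stepA PySem.Dict.empty).getD tc 0 = mval (S it) tc := by
      intro tc
      rw [foldA_getD]
      simp [PySem.Dict.getD_empty, mval]
    have htcsmem : ∀ tc, tc ∈ ((S it).foldl stepA PySem.Dict.empty).keys ↔ ∃ p ∈ S it, p.1 = tc := by
      intro tc
      rw [foldA_mem]
      simp [PySem.Dict.keys_empty]
    have hg1 : ∀ tc, ((((S it).foldl stepA PySem.Dict.empty).items).foldl stepA best).getD tc 0
        = mval (L0 ++ S it) tc := by
      intro tc
      rw [foldA_getD, items_filter_snd _ hndtcs, mval_append, foldl_max_split _ _ (mval_nonneg L0 tc), hg]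
      by_cases hmem : tc ∈ ((S it).foldl stepA PySem.Dict.empty).keys
      · rw [if_pos hmem]
        simp only [List.foldl_cons, List.foldl_nil, htcsgetD]
        unfold mval
        rfl
      · rw [if_neg hmem]
        have hnomatch : (S it).filter (fun p => p.1 == tc) = [] := by
          rw [List.filter_eq_nil_iff]
          intro p hp hb
          exact hmem ((htcsmem tc).mpr ⟨p, hp, beq_iff_eq.mp hb⟩)
        simp only [hnomatch, List.map_nil, List.foldl_nil]
        exact (max_eq_left (mval_nonneg L0 tc)).symm
    have hm1 : ∀ tc, tc ∈ ((((S it).foldl stepA PySem.Dict.empty).items).foldl stepA best).keys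
        ↔ ∃ p ∈ L0 ++ S it, p.1 = tc := by
      intro tc
      rw [foldA_mem, hm]
      constructor
      · rintro (⟨p, hp, h1⟩ | ⟨p, hp, h1⟩)
        · exact ⟨p, List.mem_append_left _ hp, h1⟩
        · have : p.1 ∈ ((S it).foldl stepA PySem.Dict.empty).keys := by
            have : p ∈ (((S it).foldl stepA PySem.Dict.empty)).items := hp
            have hk : p.1 ∈ (((S it).foldl stepA PySem.Dict.empty)).items.map (fun q => q.1) :=
              List.mem_map.mpr ⟨p, hp, rfl⟩
            exact hk
          rcases (htcsmem p.1).mp this with ⟨q, hq, hq1⟩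
          exact ⟨q, List.mem_append_right _ hq, by rw [hq1, h1]⟩
      · rintro ⟨p, hp, h1⟩
        rcases List.mem_append.mp hp with hL | hS
        · exact Or.inl ⟨p, hL, h1⟩
        · right
          have : tc ∈ ((S it).foldl stepA PySem.Dict.empty).keys := (htcsmem tc).mpr ⟨p, hS, h1⟩
          rcases List.mem_map.mp this with ⟨q, hq, hq1⟩
          exact ⟨q, hq, hq1⟩
    have hnd1 : ((((S it).foldl stepA PySem.Dict.empty).items).foldl stepA best).keys.Nodup :=
      foldA_nodup _ _ hnd
    have := ih _ _ hg1 hm1 hnd1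
    simp only [List.flatMap_cons, ← List.append_assoc]
    exact this

-- ---- named forms of the two ports' intermediate values ----

def dmk (ae : List (String × List (String × List (String × String)))) :
    PySem.Dict String (List (String × List (String × String))) := ⟨ae⟩

def igD (ae : List (String × List (String × List (String × String)))) :
    PySem.Dict String (List String) :=
  List.foldl (fun g key => g.modify (pvIterPrefix key) [] fun v => v ++ [key]) PySem.Dict.empty
    (PySem.List.sorted (dmk ae).keys (fun k => k))

def firstI (ae : List (String × List (String × List (String × String)))) (i : Int) : List String :=
  PySem.List.slice (PySem.List.sorted (igD ae).keys (fun k => k)) none (some i)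

def SA (ae : List (String × List (String × List (String × String)))) (it : String) :
    List (String × Int) :=
  ((igD ae).getD it []).flatMap (fun s => posPairs ((dmk ae).getD s []))

def LA (ae : List (String × List (String × List (String × String)))) (i : Int) :
    List (String × Int) :=
  (firstI ae i).flatMap (SA ae)

def bestA (ae : List (String × List (String × List (String × String)))) (i : Int) :
    PySem.Dict String Int :=
  (firstI ae i).foldl (fun b it => ((SA ae it).foldl stepA PySem.Dict.empty).items.foldl stepA b)
    PySem.Dict.empty

def allowB (ae : List (String × List (String × List (String × String)))) (i : Int) : List String :=
  PySem.List.slice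
    (PySem.List.sorted (PySem.Set.ofList (List.map (fun p => pvIterPrefix p.1) ae)) (fun k => k))
    none (some i)

def LB (ae : List (String × List (String × List (String × String)))) (i : Int) :
    List (String × Int) :=
  ae.flatMap (fun p =>
    if (PySem.Set.ofList (allowB ae i)).contains (pvIterPrefix p.1) then p.2.map gpair else [])

def stepR (rs : List (PySem.Set String)) (p : String × Int) : List (PySem.Set String) :=
  (PySem.List.pyRange 0 (p.2 + 1) 1).foldl (fun rs s => pvSetAt rs s p.1) rs

def init4 : List (PySem.Set String) :=
  [PySem.Set.empty, PySem.Set.empty, PySem.Set.empty, PySem.Set.empty]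

def reachedL (ae : List (String × List (String × List (String × String)))) (i : Int) :
    List (PySem.Set String) :=
  (LB ae i).foldl stepR init4

-- ---- the two ports, rewritten onto the named forms ----

theorem inner_conv (errs : List (String × List (String × String)))
    (acc : PySem.Dict String Int) :
    errs.foldl (fun tcs q =>
        if getStageNumber ((PySem.Dict.mk q.2).getD "error_type" "Unknown Error") > 0 then
          tcs.insert q.1 (max (tcs.getD q.1 0)
            (getStageNumber ((PySem.Dict.mk q.2).getD "error_type" "Unknown Error") - 1))
        else tcs) acc
      = (posPairs errs).foldl stepA acc := by
  unfold posPairs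
  rw [List.foldl_map, List.foldl_filter]
  apply List.foldl_ext
  intro a q _
  by_cases h : 0 < stageOf q
  · simp only [cpos, h, decide_true, if_true]
    have h' : getStageNumber ((PySem.Dict.mk q.2).getD "error_type" "Unknown Error") > 0 := h
    rw [if_pos h']
    rfl
  · simp only [cpos, h, decide_false, Bool.false_eq_true, if_false]
    have h' : ¬ (getStageNumber ((PySem.Dict.mk q.2).getD "error_type" "Unknown Error") > 0) := h
    rw [if_neg h']

theorem A_conv (ae : List (String × List (String × List (String × String)))) (i : Int) :
    calculate_solve_at_i ae i
      = (PySem.Dict.counter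
          ((bestA ae i).values.flatMap (fun v => PySem.List.pyRange 0 (v+1) 1))).items := by
  simp only [calculate_solve_at_i]
  rw [PySem.Dict.counter_eq_foldl, List.foldl_flatMap]
  congr 3
  unfold bestA SA firstI igD dmk
  apply List.foldl_ext
  intro b it _
  rw [List.foldl_flatMap]
  congr 2
  apply List.foldl_ext
  intro a s _
  exact inner_conv _ _

theorem stepR_gpair (rs : List (PySem.Set String)) (q : String × List (String × String)) :
    stepR rs (gpair q)
      = (PySem.List.pyRange 0 (getStageNumber ((PySem.Dict.mk q.2).getD "error_type" "Unknown Error")) 1).foldl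
          (fun rs s => pvSetAt rs s q.1) rs := by
  unfold stepR gpair stageOf
  simp only
  rw [sub_add_cancel]

theorem B_conv (ae : List (String × List (String × List (String × String)))) (i : Int) :
    calculate_solve_at_i_alt ae i = pvTally (reachedL ae i) 0 := by
  simp only [calculate_solve_at_i_alt]
  rw [show PySem.List.slice
      (PySem.List.sorted (PySem.Set.ofList (List.map (fun p => pvIterPrefix p.1) ae)) (fun k => k) false)
      none (some i) = allowB ae i from rfl]
  congr 1
  unfold reachedL LB
  rw [List.foldl_flatMap]
  apply List.foldl_ext
  intro rs p _
  by_cases h : (PySem.Set.ofList (allowB ae i)).contains (pvIterPrefix p.1) = true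
  · rw [if_pos h, if_pos h, List.foldl_map]
    apply List.foldl_ext
    intro rs' q _
    exact (stepR_gpair rs' q).symm
  · rw [if_neg h, if_neg h]
    rfl

-- ---- the two allowed-iteration lists coincide ----

theorem ofList_perm {xs ys : List String} (h : xs.Perm ys) :
    (PySem.Set.ofList xs : List String).Perm (PySem.Set.ofList ys) := by
  rw [List.perm_ext_iff_of_nodup (PySem.Set.nodup_ofList xs) (PySem.Set.nodup_ofList ys)]
  intro a
  rw [PySem.Set.mem_ofList, PySem.Set.mem_ofList]
  exact h.mem_iff

theorem igD_keys (ae : List (String × List (String × List (String × String)))) :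
    (igD ae).keys
      = PySem.Set.ofList ((PySem.List.sorted (dmk ae).keys (fun k => k)).map pvIterPrefix) := by
  unfold igD
  rw [PySem.Dict.keys_foldl_modify_key _ pvIterPrefix [] (fun _ k => fun v => v ++ [k])]
  rw [PySem.Dict.keys_empty, PySem.Set.ofList_eq_foldl]
  rfl

theorem firstI_eq_allowB (ae : List (String × List (String × List (String × String)))) (i : Int) :
    firstI ae i = allowB ae i := by
  unfold firstI allowB
  rw [igD_keys]
  congr 1
  apply PySem.List.sorted_eq_sorted_of_perm _ _ _ (fun a b h => h)
  apply ofList_perm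
  have h1 : ((PySem.List.sorted (dmk ae).keys (fun k => k)).map pvIterPrefix).Perm
      ((dmk ae).keys.map pvIterPrefix) :=
    (PySem.List.sorted_perm (dmk ae).keys (fun k => k) false).map _
  have h2 : (dmk ae).keys.map pvIterPrefix = List.map (fun p => pvIterPrefix p.1) ae := by
    show (ae.map (fun p => p.1)).map pvIterPrefix = _
    rw [List.map_map]
    rfl
  rw [h2] at h1
  exact h1

-- ---- the grouping dict: each group is a filter of the sorted key list ----

theorem group_eq (ae : List (String × List (String × List (String × String)))) (it : String) :
    (igD ae).getD it []
      = (PySem.List.sorted (dmk ae).keys (fun k => k)).filter (fun k => pvIterPrefix k == it) := by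
  unfold igD
  have hmap : ∀ (l : List String) (g : PySem.Dict String (List String)),
      l.foldl (fun g key => g.modify (pvIterPrefix key) [] fun v => v ++ [key]) g
        = (l.map (fun k => (pvIterPrefix k, k))).foldl (fun d p => d.modify p.1 [] fun v => v ++ [p.2]) g := by
    intro l g
    rw [List.foldl_map]
  rw [hmap, PySem.Dict.getD_foldl_modify_append, PySem.Dict.getD_empty]
  rw [List.filter_map]
  have : ((fun p : String × String => p.1 == it) ∘ fun k => (pvIterPrefix k, k))
      = fun k => pvIterPrefix k == it := rfl
  rw [this, List.map_map, List.nil_append]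
  exact List.map_id' _

-- ---- the two pair streams are permutations of each other (under Pre_) ----

theorem slice_nodup (xs : List String) (i : Int) (h : xs.Nodup) :
    (PySem.List.slice xs none (some i)).Nodup := by
  refine List.Sublist.nodup ?_ h
  simp only [PySem.List.slice]
  exact (List.take_sublist _ _).trans (List.drop_sublist _ _)

theorem contains_ofList (xs : List String) (y : String) :
    (PySem.Set.ofList xs).contains y = decide (y ∈ xs) := by
  simp only [PySem.Set.contains]
  rw [Bool.eq_iff_iff]
  simp [PySem.Set.mem_ofList]

theorem flatMap_ite {α β : Type} (l : List α) (c : α → Bool) (g : α → List β) :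
    l.flatMap (fun x => if c x then g x else []) = (l.filter c).flatMap g := by
  induction l with
  | nil => rfl
  | cons x t ih =>
    by_cases h : c x = true
    · simp only [List.flatMap_cons, List.filter_cons, h, if_true, ih]
    · simp only [List.flatMap_cons, List.filter_cons, h, Bool.false_eq_true, if_false,
        List.nil_append, ih]

theorem flatMap_congr {α β : Type} (l : List α) (f g : α → List β)
    (h : ∀ x ∈ l, f x = g x) : l.flatMap f = l.flatMap g := by
  induction l with
  | nil => rfl
  | cons x t ih =>
    simp only [List.flatMap_cons, h x List.mem_cons_self,
      ih (fun y hy => h y (List.mem_cons_of_mem _ hy))]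

theorem flatMap_fst {α β γ : Type} (l : List (α × β)) (g : α → List γ) :
    l.flatMap (fun p => g p.1) = (l.map (fun p => p.1)).flatMap g := by
  induction l with
  | nil => rfl
  | cons x t ih => simp only [List.flatMap_cons, List.map_cons, ih]

theorem filt_elem (errs : List (String × List (String × String))) :
    (errs.map gpair).filter (fun p => decide (0 ≤ p.2)) = posPairs errs := by
  unfold posPairs
  rw [List.filter_map]
  congr 1
  apply List.filter_congr
  intro q _
  show decide (0 ≤ (gpair q).2) = cpos q
  unfold gpair cpos
  simp only
  exact decide_eq_decide.mpr (by omega)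

theorem lookup_mem (ae : List (String × List (String × List (String × String))))
    (hpre : (ae.map (fun p => p.1)).Nodup)
    (p : String × List (String × List (String × String))) (hp : p ∈ ae) :
    (dmk ae).getD p.1 [] = p.2 := by
  have hnd : (dmk ae).keys.Nodup := hpre
  have hget := PySem.Dict.get?_of_mem_items (d := dmk ae) (k := p.1) (v := p.2)
    (by exact hp) hnd
  rw [PySem.Dict.getD_eq_get?_getD, hget]
  rfl

set_option maxHeartbeats 2000000 in
theorem streams_perm (ae : List (String × List (String × List (String × String)))) (i : Int)
    (hpre : (ae.map (fun p => p.1)).Nodup) :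
    (LA ae i).Perm ((LB ae i).filter (fun p => decide (0 ≤ p.2))) := by
  have hLA : LA ae i
      = ((firstI ae i).flatMap (fun it => (igD ae).getD it [])).flatMap
          (fun s => posPairs ((dmk ae).getD s [])) := by
    unfold LA SA
    rw [List.flatMap_assoc]
  have hLB : (LB ae i).filter (fun p => decide (0 ≤ p.2))
      = ((ae.map (fun p => p.1)).filter
            (fun k => (PySem.Set.ofList (allowB ae i)).contains (pvIterPrefix k))).flatMap
          (fun k => posPairs ((dmk ae).getD k [])) := by
    unfold LB
    rw [List.filter_flatMap]
    have h1 : ∀ p ∈ ae,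
        (if (PySem.Set.ofList (allowB ae i)).contains (pvIterPrefix p.1) then p.2.map gpair
          else []).filter (fun p => decide (0 ≤ p.2))
        = (if (PySem.Set.ofList (allowB ae i)).contains (pvIterPrefix p.1) then
            posPairs ((dmk ae).getD p.1 []) else []) := by
      intro p hp
      split_ifs
      · rw [filt_elem, lookup_mem ae hpre p hp]
      · rfl
    rw [flatMap_congr _ _ _ h1]
    have e1 := flatMap_fst ae (fun k =>
      if (PySem.Set.ofList (allowB ae i)).contains (pvIterPrefix k) then
        posPairs ((dmk ae).getD k []) else [])
    simp only at e1
    rw [e1, flatMap_ite]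
  rw [hLA, hLB]
  apply List.Perm.flatMap _ (fun a _ => List.Perm.refl _)
  -- key-list permutation
  have hnod : (firstI ae i).Nodup := by
    unfold firstI
    rw [igD_keys]
    apply slice_nodup
    exact ((PySem.List.sorted_perm _ _ _).nodup_iff).mpr (PySem.Set.nodup_ofList _)
  have hpart := partition_flatMap_perm pvIterPrefix (firstI ae i) hnod
      (PySem.List.sorted (dmk ae).keys (fun k => k))
  have hgrp : (firstI ae i).flatMap (fun it => (igD ae).getD it [])
      = (firstI ae i).flatMap (fun it =>
          (PySem.List.sorted (dmk ae).keys (fun k => k)).filter (fun k => pvIterPrefix k == it)) :=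
    flatMap_congr _ _ _ (fun it _ => group_eq ae it)
  rw [hgrp]
  refine hpart.trans ?_
  have hfil : ∀ (l : List String),
      l.filter (fun k => decide (pvIterPrefix k ∈ firstI ae i))
        = l.filter (fun k => (PySem.Set.ofList (allowB ae i)).contains (pvIterPrefix k)) := by
    intro l
    apply List.filter_congr
    intro k _
    rw [contains_ofList, ← firstI_eq_allowB]
  rw [hfil]
  exact ((PySem.List.sorted_perm (dmk ae).keys (fun k => k) false).filter _)

theorem bestA_char (ae : List (String × List (String × List (String × String)))) (i : Int) :
    (∀ tc, (bestA ae i).getD tc 0 = mval (LA ae i) tc) ∧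
    (∀ tc, tc ∈ (bestA ae i).keys ↔ ∃ p ∈ LA ae i, p.1 = tc) ∧ (bestA ae i).keys.Nodup := by
  obtain ⟨h1, h2, h3⟩ := A_outer (SA ae) (firstI ae i) PySem.Dict.empty []
    (fun tc => by simp [PySem.Dict.getD_empty, mval])
    (fun tc => by simp [PySem.Dict.keys_empty])
    (by simp [PySem.Dict.keys_empty])
  refine ⟨fun tc => ?_, fun tc => ?_, h3⟩
  · have := h1 tc
    rwa [List.nil_append] at this
  · have := h2 tc
    rwa [List.nil_append] at this

theorem valsA_nonneg (ae : List (String × List (String × List (String × String)))) (i : Int) :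
    ∀ v ∈ (bestA ae i).values, 0 ≤ v := by
  intro v hv
  obtain ⟨hAg, _, hAnd⟩ := bestA_char ae i
  rw [PySem.Dict.values_eq_map_keys _ hAnd 0] at hv
  rcases List.mem_map.mp hv with ⟨k, _, rfl⟩
  rw [hAg k]
  exact mval_nonneg _ _

-- ---- A's result in canonical form ----

theorem A_canon (ae : List (String × List (String × List (String × String)))) (i : Int) :
    calculate_solve_at_i ae i
      = (PySem.List.pyRange 0 ((bestA ae i).values.foldl max (-1) + 1) 1).map
          (fun s => (s, (((bestA ae i).values.countP (fun v => decide (s ≤ v)) : Nat) : Int))) := by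
  rw [A_conv, PySem.Dict.items_counter, range_set _ (valsA_nonneg ae i)]
  apply List.map_congr_left
  intro s hs
  have hs0 : 0 ≤ s := (PySem.List.mem_pyRange_one.mp hs).1
  rw [count_flat_ranges _ _ hs0]

-- ---- B's reached list: pointwise characterisation ----

theorem pvSetAt_length (rs : List (PySem.Set String)) (s : Int) (tc : String) :
    (pvSetAt rs s tc).length = rs.length := by
  unfold pvSetAt
  exact List.length_mapIdx

theorem pvSetAt_getD (rs : List (PySem.Set String)) (s : Int) (tc : String) (j : Nat)
    (hj : j < rs.length) :
    (pvSetAt rs s tc).getD j []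
      = if (j : Int) = s then PySem.Set.add (rs.getD j []) tc else rs.getD j [] := by
  unfold pvSetAt
  rw [List.getD_eq_getElem _ _ (by rw [List.length_mapIdx]; exact hj),
    List.getD_eq_getElem _ _ hj, List.getElem_mapIdx]

theorem foldSet_length (l : List Int) (tc : String) : ∀ (rs : List (PySem.Set String)),
    (l.foldl (fun rs s => pvSetAt rs s tc) rs).length = rs.length := by
  induction l with
  | nil => intro rs; rfl
  | cons s t ih => intro rs; simp only [List.foldl_cons]; rw [ih, pvSetAt_length]

theorem foldRange_getD (tc : String) (m : Nat) : ∀ (c n : Int) (rs : List (PySem.Set String))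
    (j : Nat), m = (n - c).toNat → j < rs.length →
    ((PySem.List.pyRange c n 1).foldl (fun rs s => pvSetAt rs s tc) rs).getD j []
      = if c ≤ (j : Int) ∧ (j : Int) < n then PySem.Set.add (rs.getD j []) tc
        else rs.getD j [] := by
  induction m with
  | zero =>
    intro c n rs j hm hj
    have : n ≤ c := by omega
    rw [PySem.List.pyRange_one_eq_nil this]
    simp only [List.foldl_nil]
    rw [if_neg (by omega)]
  | succ m ih =>
    intro c n rs j hm hj
    by_cases hlt : c < n
    · rw [PySem.List.pyRange_one_cons hlt]
      simp only [List.foldl_cons]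
      rw [ih (c+1) n _ j (by omega) (by rw [pvSetAt_length]; exact hj)]
      rw [pvSetAt_getD _ _ _ _ hj]
      by_cases hc : (j : Int) = c
      · rw [if_pos hc]
        rw [if_neg (by omega), if_pos (by omega)]
      · rw [if_neg hc]
        by_cases hin : c + 1 ≤ (j : Int) ∧ (j : Int) < n
        · rw [if_pos hin, if_pos (by omega)]
        · rw [if_neg hin, if_neg (by omega)]
    · rw [PySem.List.pyRange_one_eq_nil (by omega)]
      simp only [List.foldl_nil]
      rw [if_neg (by omega)]

theorem stepR_length (rs : List (PySem.Set String)) (p : String × Int) :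
    (stepR rs p).length = rs.length := by
  unfold stepR
  exact foldSet_length _ _ rs

theorem stepR_getD (rs : List (PySem.Set String)) (p : String × Int) (j : Nat)
    (hj : j < rs.length) :
    (stepR rs p).getD j []
      = if decide ((j : Int) ≤ p.2) = true then PySem.Set.add (rs.getD j []) p.1
        else rs.getD j [] := by
  unfold stepR
  rw [foldRange_getD p.1 (p.2 + 1 - 0).toNat 0 (p.2 + 1) rs j rfl hj]
  by_cases h : (j : Int) ≤ p.2
  · rw [if_pos (by omega), if_pos (by simpa using h)]
  · rw [if_neg (by omega), if_neg (by simpa using h)]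

theorem foldLB_length (L : List (String × Int)) : ∀ (rs : List (PySem.Set String)),
    (L.foldl stepR rs).length = rs.length := by
  induction L with
  | nil => intro rs; rfl
  | cons p t ih => intro rs; simp only [List.foldl_cons]; rw [ih, stepR_length]

theorem foldLB_getD (L : List (String × Int)) : ∀ (rs : List (PySem.Set String)) (j : Nat),
    j < rs.length →
    (L.foldl stepR rs).getD j []
      = (L.filter (fun p => decide ((j : Int) ≤ p.2))).foldl
          (fun r p => PySem.Set.add r p.1) (rs.getD j []) := by
  induction L with
  | nil => intro rs j hj; rfl
  | cons p t ih =>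
    intro rs j hj
    simp only [List.foldl_cons, List.filter_cons]
    rw [ih _ j (by rw [stepR_length]; exact hj), stepR_getD rs p j hj]
    by_cases h : decide ((j : Int) ≤ p.2) = true
    · rw [if_pos h, if_pos h]
      rfl
    · rw [if_neg h, if_neg h]

theorem reached_getD (ae : List (String × List (String × List (String × String)))) (i : Int)
    (j : Nat) (hj : j < 4) :
    (reachedL ae i).getD j []
      = ((LB ae i).filter (fun p => decide ((j : Int) ≤ p.2))).foldl
          (fun r p => PySem.Set.add r p.1) [] := by
  unfold reachedL
  rw [foldLB_getD _ _ j (by simpa [init4] using hj)]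
  congr 1
  interval_cases j <;> rfl

theorem mem_reached (ae : List (String × List (String × List (String × String)))) (i : Int)
    (j : Nat) (hj : j < 4) (x : String) :
    x ∈ (reachedL ae i).getD j [] ↔ ∃ p ∈ LB ae i, p.1 = x ∧ (j : Int) ≤ p.2 := by
  rw [reached_getD ae i j hj]
  rw [PySem.Set.mem_foldl_add _ (fun p : String × Int => p.1) []]
  constructor
  · rintro (hx | ⟨p, hp, rfl⟩)
    · exact absurd hx (List.not_mem_nil)
    · rcases List.mem_filter.mp hp with ⟨hpL, hpd⟩
      exact ⟨p, hpL, rfl, by simpa using hpd⟩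
  · rintro ⟨p, hp, h1, h2⟩
    exact Or.inr ⟨p, List.mem_filter.mpr ⟨hp, by simpa using h2⟩, h1.symm⟩

theorem nodup_reached (ae : List (String × List (String × List (String × String)))) (i : Int)
    (j : Nat) (hj : j < 4) : ((reachedL ae i).getD j []).Nodup := by
  rw [reached_getD ae i j hj,
    ← PySem.Set.update_map_eq_foldl_add _ (fun p : String × Int => p.1) []]
  exact PySem.Set.nodup_update _ _ (by simp)

-- ---- LA's values are the stage indices 0..3; transfer between LA and LB ----

theorem LA_snd (ae : List (String × List (String × List (String × String)))) (i : Int) :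
    ∀ p ∈ LA ae i, 0 ≤ p.2 ∧ p.2 ≤ 3 := by
  intro p hp
  unfold LA SA at hp
  rcases List.mem_flatMap.mp hp with ⟨it, _, hp1⟩
  rcases List.mem_flatMap.mp hp1 with ⟨s, _, hp2⟩
  unfold posPairs at hp2
  rcases List.mem_map.mp hp2 with ⟨q, hq, rfl⟩
  have hcp : cpos q = true := (List.mem_filter.mp hq).2
  have h1 : 0 < stageOf q := by simpa [cpos] using hcp
  have h2 := stageOf_le_four q
  unfold gpair
  constructor <;> simp only <;> omega

theorem mem_LA_iff_LB (ae : List (String × List (String × List (String × String)))) (i : Int)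
    (hpre : (ae.map (fun p => p.1)).Nodup) (p : String × Int) :
    p ∈ LA ae i ↔ p ∈ LB ae i ∧ 0 ≤ p.2 := by
  rw [(streams_perm ae i hpre).mem_iff, List.mem_filter]
  simp

-- ---- each reached set is the set of test cases with best stage ≥ j ----

theorem mem_reached_best (ae : List (String × List (String × List (String × String)))) (i : Int)
    (hpre : (ae.map (fun p => p.1)).Nodup) (j : Nat) (hj : j < 4) (x : String) :
    x ∈ (reachedL ae i).getD j []
      ↔ x ∈ (bestA ae i).keys ∧ (j : Int) ≤ (bestA ae i).getD x 0 := by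
  obtain ⟨hAg, hAm, _⟩ := bestA_char ae i
  rw [mem_reached ae i j hj, hAg, hAm]
  constructor
  · rintro ⟨p, hp, h1, h2⟩
    have hpa : p ∈ LA ae i := (mem_LA_iff_LB ae i hpre p).mpr ⟨hp, by omega⟩
    exact ⟨⟨p, hpa, h1⟩, le_trans h2 (mval_ge_of_mem _ p hpa x h1)⟩
  · rintro ⟨⟨p0, hp0, h01⟩, hmv⟩
    by_cases hj0 : 0 < (j : Int)
    · rcases exists_of_mval_ge _ x _ hj0 hmv with ⟨p, hpa, h1, h2⟩
      exact ⟨p, ((mem_LA_iff_LB ae i hpre p).mp hpa).1, h1, h2⟩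
    · refine ⟨p0, ((mem_LA_iff_LB ae i hpre p0).mp hp0).1, h01, ?_⟩
      have := (LA_snd ae i p0 hp0).1
      omega

-- ---- sizes and emptiness of the reached sets ----

theorem reached_length (ae : List (String × List (String × List (String × String)))) (i : Int)
    (hpre : (ae.map (fun p => p.1)).Nodup) (j : Nat) (hj : j < 4) :
    ((reachedL ae i).getD j []).length
      = (bestA ae i).values.countP (fun v => decide ((j : Int) ≤ v)) := by
  obtain ⟨_, _, hAnd⟩ := bestA_char ae i
  have hK : ((reachedL ae i).getD j []).Perm
      ((bestA ae i).keys.filter (fun x => decide ((j : Int) ≤ (bestA ae i).getD x 0))) := by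
    rw [List.perm_ext_iff_of_nodup (nodup_reached ae i j hj) (hAnd.filter _)]
    intro x
    rw [mem_reached_best ae i hpre j hj, List.mem_filter]
    simp
  rw [hK.length_eq, PySem.Dict.values_eq_map_keys _ hAnd 0, List.countP_map,
    List.countP_eq_length_filter]
  rfl

theorem reached_empty_iff (ae : List (String × List (String × List (String × String)))) (i : Int)
    (hpre : (ae.map (fun p => p.1)).Nodup) (j : Nat) (hj : j < 4) :
    (reachedL ae i).getD j [] = []
      ↔ ¬ ((j : Int) ≤ (bestA ae i).values.foldl max (-1)) := by
  rw [foldl_max_ge_iff _ _ _ (by omega)]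
  constructor
  · intro hnil ⟨v, hv, hjv⟩
    obtain ⟨hAg, _, hAnd⟩ := bestA_char ae i
    rw [PySem.Dict.values_eq_map_keys _ hAnd 0] at hv
    rcases List.mem_map.mp hv with ⟨x, hx, rfl⟩
    have : x ∈ (reachedL ae i).getD j [] :=
      (mem_reached_best ae i hpre j hj x).mpr ⟨hx, hjv⟩
    rw [hnil] at this
    exact List.not_mem_nil this
  · intro hne
    rw [List.eq_nil_iff_forall_not_mem]
    intro x hx
    rcases (mem_reached_best ae i hpre j hj x).mp hx with ⟨hxk, hxv⟩
    obtain ⟨_, _, hAnd⟩ := bestA_char ae i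
    refine hne ⟨(bestA ae i).getD x 0, ?_, hxv⟩
    rw [PySem.Dict.values_eq_map_keys _ hAnd 0]
    exact List.mem_map.mpr ⟨x, hxk, rfl⟩

theorem valsA_le_three (ae : List (String × List (String × List (String × String)))) (i : Int) :
    ∀ v ∈ (bestA ae i).values, v ≤ 3 := by
  intro v hv
  obtain ⟨hAg, _, hAnd⟩ := bestA_char ae i
  rw [PySem.Dict.values_eq_map_keys _ hAnd 0] at hv
  rcases List.mem_map.mp hv with ⟨x, _, rfl⟩
  rw [hAg x]
  unfold mval
  refine foldl_max_le _ 0 3 (by norm_num) ?_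
  intro w hw
  rcases List.mem_map.mp hw with ⟨p, hp, rfl⟩
  exact (LA_snd ae i p (List.mem_filter.mp hp).1).2

theorem exists_four (l : List (PySem.Set String)) (h : l.length = 4) :
    ∃ r0 r1 r2 r3, l = [r0, r1, r2, r3] := by
  match l, h with
  | [a, b, c, d], _ => exact ⟨a, b, c, d, rfl⟩

theorem isEmpty_false_of_ne {α : Type} (l : List α) (h : l ≠ []) : l.isEmpty = false := by
  cases l with
  | nil => exact absurd rfl h
  | cons a t => rfl

-- ---- main equality ----

theorem main_eq (ae : List (String × List (String × List (String × String)))) (i : Int)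
    (hpre : (ae.map (fun p => p.1)).Nodup) :
    calculate_solve_at_i ae i = calculate_solve_at_i_alt ae i := by
  rw [A_canon, B_conv]
  have hlen : (reachedL ae i).length = 4 := by
    unfold reachedL
    rw [foldLB_length]
    rfl
  obtain ⟨r0, r1, r2, r3, hrs⟩ := exists_four _ hlen
  have hget : ∀ (j : Nat), j < 4 → (reachedL ae i).getD j [] = [r0, r1, r2, r3].getD j [] := by
    intro j _; rw [hrs]
  have hL : ∀ (j : Nat), (hj : j < 4) → (PySem.Set.len ([r0, r1, r2, r3].getD j []))
      = (((bestA ae i).values.countP (fun v => decide ((j : Int) ≤ v)) : Nat) : Int) := by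
    intro j hj
    have := reached_length ae i hpre j hj
    rw [hget j hj] at this
    simp only [PySem.Set.len, this]
  have hE : ∀ (j : Nat), (hj : j < 4) → ([r0, r1, r2, r3].getD j [] = []
      ↔ ¬ ((j : Int) ≤ (bestA ae i).values.foldl max (-1))) := by
    intro j hj
    rw [← hget j hj]
    exact reached_empty_iff ae i hpre j hj
  rw [hrs]
  have hMl : -1 ≤ (bestA ae i).values.foldl max (-1) :=
    (PySem.List.le_foldl_max _ (-1)).1
  have hMu : (bestA ae i).values.foldl max (-1) ≤ 3 :=
    foldl_max_le _ (-1) 3 (by norm_num) (valsA_le_three ae i)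
  have h0 := hE 0 (by norm_num)
  have h1 := hE 1 (by norm_num)
  have h2 := hE 2 (by norm_num)
  have h3 := hE 3 (by norm_num)
  have g0 := hL 0 (by norm_num)
  have g1 := hL 1 (by norm_num)
  have g2 := hL 2 (by norm_num)
  have g3 := hL 3 (by norm_num)
  simp only [List.getD, List.getElem?_cons_zero, List.getElem?_cons_succ, Option.getD_some] at h0 h1 h2 h3 g0 g1 g2 g3
  push_cast at h0 h1 h2 h3 g0 g1 g2 g3
  have g0' : List.countP (fun v => decide ((0 : Int) ≤ v)) (bestA ae i).values = r0.length := by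
    simp only [PySem.Set.len] at g0; exact_mod_cast g0.symm
  have g1' : List.countP (fun v => decide ((1 : Int) ≤ v)) (bestA ae i).values = r1.length := by
    simp only [PySem.Set.len] at g1; exact_mod_cast g1.symm
  have g2' : List.countP (fun v => decide ((2 : Int) ≤ v)) (bestA ae i).values = r2.length := by
    simp only [PySem.Set.len] at g2; exact_mod_cast g2.symm
  have g3' : List.countP (fun v => decide ((3 : Int) ≤ v)) (bestA ae i).values = r3.length := by
    simp only [PySem.Set.len] at g3; exact_mod_cast g3.symm
  rcases (show (bestA ae i).values.foldl max (-1) = -1 ∨ (bestA ae i).values.foldl max (-1) = 0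
      ∨ (bestA ae i).values.foldl max (-1) = 1 ∨ (bestA ae i).values.foldl max (-1) = 2
      ∨ (bestA ae i).values.foldl max (-1) = 3 from by omega) with hM | hM | hM | hM | hM <;>
    rw [hM] at h0 h1 h2 h3 ⊢
  · have e0 : r0 = [] := h0.mpr (by norm_num)
    rw [show ((-1 : Int) + 1) = 0 from by ring, PySem.List.pyRange_one_eq_nil (by norm_num)]
    simp [pvTally, e0]
  · have e0 : r0.isEmpty = false := isEmpty_false_of_ne _ (fun h => (h0.mp h) (by norm_num))
    have e1 : r1 = [] := h1.mpr (by norm_num)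
    rw [show ((0 : Int) + 1) = 1 from by ring, show PySem.List.pyRange 0 1 1 = [0] from by decide]
    simp [pvTally, e0, e1, g0']
  · have e0 : r0.isEmpty = false := isEmpty_false_of_ne _ (fun h => (h0.mp h) (by norm_num))
    have e1 : r1.isEmpty = false := isEmpty_false_of_ne _ (fun h => (h1.mp h) (by norm_num))
    have e2 : r2 = [] := h2.mpr (by norm_num)
    rw [show ((1 : Int) + 1) = 2 from by ring, show PySem.List.pyRange 0 2 1 = [0, 1] from by decide]
    simp [pvTally, e0, e1, e2, g0', g1']
  · have e0 : r0.isEmpty = false := isEmpty_false_of_ne _ (fun h => (h0.mp h) (by norm_num))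
    have e1 : r1.isEmpty = false := isEmpty_false_of_ne _ (fun h => (h1.mp h) (by norm_num))
    have e2 : r2.isEmpty = false := isEmpty_false_of_ne _ (fun h => (h2.mp h) (by norm_num))
    have e3 : r3 = [] := h3.mpr (by norm_num)
    rw [show ((2 : Int) + 1) = 3 from by ring, show PySem.List.pyRange 0 3 1 = [0, 1, 2] from by decide]
    simp [pvTally, e0, e1, e2, e3, g0', g1', g2']
  · have e0 : r0.isEmpty = false := isEmpty_false_of_ne _ (fun h => (h0.mp h) (by norm_num))
    have e1 : r1.isEmpty = false := isEmpty_false_of_ne _ (fun h => (h1.mp h) (by norm_num))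
    have e2 : r2.isEmpty = false := isEmpty_false_of_ne _ (fun h => (h2.mp h) (by norm_num))
    have e3 : r3.isEmpty = false := isEmpty_false_of_ne _ (fun h => (h3.mp h) (by norm_num))
    rw [show ((3 : Int) + 1) = 4 from by ring, show PySem.List.pyRange 0 4 1 = [0, 1, 2, 3] from by decide]
    simp [pvTally, e0, e1, e2, e3, g0', g1', g2', g3']

-- ===== VERDICT (by name: the statement is the Claim_ definition above) =====
theorem calculate_solve_at_i_spec : Claim_equal_calculate_solve_at_i := by
  intro ae i _ hpre
  exact main_eq ae i hpre
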